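-- pv_equiv track=rewrite | github.com/dailysound/Programmers_Python | Python3/Level2/[3차] 방금그곡.py | solution
-- ===== SOURCE A (Python) =====
-- def Replace(music):
--     if 'A#' in music:
--         music = music.replace('A#','a')
--     if 'C#' in music:
--         music = music.replace('C#','c')
--     if 'D#' in music:
--         music = music.replace('D#','d')
--     if 'F#' in music:
--         music = music.replace('F#','f')
--     if 'G#' in music:
--         music = music.replace('G#','g')
--     return music
--
-- def solution(m, musicinfos):
--     m = Replace(m) # 네오가 기억한 멜로디 중 #이 붙은 음이 있을 수 있기 때문에 치환 작업 해줌
--     answer = []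
--     turn = 0 # 먼저 입력된 음악 판단용
--
--     for info in musicinfos:
--         turn +=1
--         music = info.split(',') # 곡별로 나눔
--         # ['12:00', '12:14', 'HELLO', 'CDEFGAB'] 이런식으로 들어가게된다.
--
--         music_title = music[2]
--         start_time = music[0].split(':') # 시작시간
--         end_time = music[1].split(':') # 종료시간
--
--         play_time = (int(end_time[0])*60 + int(end_time[1])) - (int(start_time[0])*60 + int(start_time[1])) # 곡 재생 시간
--
--         # #이 붙은 음 치환하기
--         replaced = Replace(music[3])
--         # ABCDEF -> ABCDEF / CC#B -> CcB
--
--         # 음악 재생시간 동안의 음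
--         m_play = (replaced*play_time)[:play_time]
--         # 재생시간만큼 음을 반복한 후 재생시간만큼 자르기
--         # 재생시간이 5이고 음이 ABC이면 ABCABCABCABCABC -> ABCAB 로 구해짐
--
--         if m in m_play:
--             answer.append([play_time, turn, music_title])
--
--     # answer에 아무것도 없으면 "None"
--     if not answer:
--         return "(None)"
--     # 결과의 길이가 1이면 바로 제목 반환
--     elif len(answer) == 1:
--         return answer[0][2]
--     # 결과의 길이가 2이상이면 재생된 시간이 긴 음악, 먼저 입력된 음악 순으로 정렬 후 제목 반환
--     else:
--         answer = sorted(answer, key= lambda x:(-x[0],x[1]))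
--         return answer[0][2]
-- ===== SOURCE B (Python) =====
-- _SHARPS = (('A#', 'a'), ('C#', 'c'), ('D#', 'd'), ('F#', 'f'), ('G#', 'g'))
--
--
-- def _canon(s):
--     # '#'-notes become single lowercase letters (replace is a no-op when absent)
--     for pat, rep in _SHARPS:
--         s = s.replace(pat, rep)
--     return s
--
--
-- def _minutes(t):
--     h, mi = t.split(':')[:2]
--     return int(h) * 60 + int(mi)
--
--
-- def solution(m, musicinfos):
--     m = _canon(m)
--     best_time = None          # running best instead of append-then-sort
--     best_title = '(None)'
--     for info in musicinfos:
--         start, end, title, notes = info.split(',')[:4]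
--         play = _minutes(end) - _minutes(start)
--         if (best_time is None or play > best_time) and m in (_canon(notes) * play)[:play]:
--             best_time, best_title = play, title
--     return best_title
-- ===== Notes on version B (the rewrite author's own statement) =====
-- stated objective: simpler
-- what changed: B keeps a running best (best_time, best_title) updated with a strict '>' during one pass instead of appending every match to a list and sorting it by (-play_time, turn) at the end, and replaces the guarded Replace helper by an unconditional chain of str.replace calls.
import Mathlib
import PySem

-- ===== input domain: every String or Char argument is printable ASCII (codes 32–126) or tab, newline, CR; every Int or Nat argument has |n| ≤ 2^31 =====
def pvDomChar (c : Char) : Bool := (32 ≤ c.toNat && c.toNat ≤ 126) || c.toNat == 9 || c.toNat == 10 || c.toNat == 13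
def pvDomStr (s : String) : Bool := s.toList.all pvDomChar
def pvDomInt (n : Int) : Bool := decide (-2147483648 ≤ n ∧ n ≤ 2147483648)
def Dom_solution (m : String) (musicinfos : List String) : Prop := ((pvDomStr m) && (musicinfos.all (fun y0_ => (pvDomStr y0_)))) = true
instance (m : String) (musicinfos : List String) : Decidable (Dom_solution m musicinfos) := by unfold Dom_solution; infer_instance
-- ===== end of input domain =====

-- B replaces A's append-to-list-then-sort-by-(-play,turn) selection with a single-pass
-- running best (objective: simpler); return-value equivalence, neither version mutates its arguments.

-- ===== PORT A =====
-- A's Replace helper: guarded str.replace chain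
def pvReplaceA (music : String) : String :=
  let music := if PySem.Str.isIn "A#" music then PySem.Str.replace music "A#" "a" else music
  let music := if PySem.Str.isIn "C#" music then PySem.Str.replace music "C#" "c" else music
  let music := if PySem.Str.isIn "D#" music then PySem.Str.replace music "D#" "d" else music
  let music := if PySem.Str.isIn "F#" music then PySem.Str.replace music "F#" "f" else music
  let music := if PySem.Str.isIn "G#" music then PySem.Str.replace music "G#" "g" else music
  music

-- one iteration of A's for-loop; state = some (answer, turn), none = a raised exception
def pvStepA (m : String) (st : Option (List (Int × Int × String) × Int)) (info : String) :
    Option (List (Int × Int × String) × Int) :=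
  match st with
  | none => none
  | some (answer, turn) =>
    let turn := turn + 1
    match PySem.Str.split? info "," with
    | none => none
    | some music =>
      match PySem.List.pyGet? music 2 with          -- music[2]
      | none => none
      | some music_title =>
        match PySem.List.pyGet? music 0 with        -- music[0].split(':')
        | none => none
        | some m0 =>
          match PySem.Str.split? m0 ":" with
          | none => none
          | some start_time =>
            match PySem.List.pyGet? music 1 with    -- music[1].split(':')
            | none => none
            | some m1 =>
              match PySem.Str.split? m1 ":" with
              | none => none
              | some end_time =>
                match PySem.List.pyGet? end_time 0, PySem.List.pyGet? end_time 1,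
                      PySem.List.pyGet? start_time 0, PySem.List.pyGet? start_time 1 with
                | some e0, some e1, some s0, some s1 =>
                  match PySem.Int.ofStr? e0, PySem.Int.ofStr? e1,
                        PySem.Int.ofStr? s0, PySem.Int.ofStr? s1 with
                  | some ie0, some ie1, some is0, some is1 =>
                    let play_time := (ie0 * 60 + ie1) - (is0 * 60 + is1)
                    match PySem.List.pyGet? music 3 with   -- music[3]
                    | none => none
                    | some m3 =>
                      let replaced := pvReplaceA m3
                      -- (replaced*play_time)[:play_time], membership on code points (exact)
                      let m_play := PySem.List.slice (PySem.List.pyRepeat replaced.toList play_time)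
                                      none (some play_time)
                      if PySem.Chars.isIn m.toList m_play then
                        some (answer ++ [(play_time, turn, music_title)], turn)
                      else
                        some (answer, turn)
                  | _, _, _, _ => none
                | _, _, _, _ => none

def solution (m : String) (musicinfos : List String) : String :=
  match musicinfos.foldl (pvStepA (pvReplaceA m)) (some ([], 0)) with
  | none => ""   -- unreachable under Pre_solution (Python raises there)
  | some (answer, _) =>
    if answer = [] then "(None)"
    else if answer.length = 1 then (answer.headD (0, 0, "")).2.2   -- answer[0][2] on a nonempty list
    else
      ((PySem.List.sorted2 answer (fun x => -x.1) (fun x => x.2.1) false).headD (0, 0, "")).2.2  -- answer[0][2]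

-- ===== PORT B =====
def pvSharps : List (String × String) := [("A#", "a"), ("C#", "c"), ("D#", "d"), ("F#", "f"), ("G#", "g")]

def pvCanon (s : String) : String :=
  pvSharps.foldl (fun s p => PySem.Str.replace s p.1 p.2) s

-- _minutes(t); none = a raised exception
def pvMinutes? (t : String) : Option Int :=
  match PySem.Str.split? t ":" with
  | none => none
  | some parts =>
    match parts with                                   -- h, mi = t.split(':')[:2]
    | h :: mi :: _ =>
      match PySem.Int.ofStr? h, PySem.Int.ofStr? mi with
      | some a, some b => some (a * 60 + b)
      | _, _ => none
    | _ => none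

-- one iteration of B's for-loop; state = some (best_time, best_title), none = a raised exception
def pvStepB (m : String) (st : Option (Option Int × String)) (info : String) :
    Option (Option Int × String) :=
  match st with
  | none => none
  | some (best_time, best_title) =>
    match PySem.Str.split? info "," with
    | none => none
    | some parts =>
      match parts with                                 -- start, end, title, notes = info.split(',')[:4]
      | start :: «end» :: title :: notes :: _ =>
        match pvMinutes? «end», pvMinutes? start with
        | some te, some ts =>
          let play := te - ts
          if (match best_time with | none => true | some b => play > b) &&
             PySem.Chars.isIn m.toList
               (PySem.List.slice (PySem.List.pyRepeat (pvCanon notes).toList play) none (some play))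
          then some (some play, title)
          else some (best_time, best_title)
        | _, _ => none
      | _ => none

def solution_alt (m : String) (musicinfos : List String) : String :=
  match musicinfos.foldl (pvStepB (pvCanon m)) (some (none, "(None)")) with
  | none => ""   -- unreachable under Pre_solution
  | some (_, best_title) => best_title

-- ===== PRECONDITION & SPEC =====
def pvTimeOk (t : String) : Bool :=
  match PySem.Str.split? t ":" with
  | some (a :: b :: _) => (PySem.Int.ofStr? a).isSome && (PySem.Int.ofStr? b).isSome
  | _ => false

def pvInfoOk (info : String) : Bool :=
  match PySem.Str.split? info "," with
  | some (s :: e :: _ :: _ :: _) => pvTimeOk s && pvTimeOk e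
  | _ => false

-- Pre_ excludes exactly the malformed entries on which Python A raises (fewer than 4
-- comma-fields, times without ':' or with non-integer parts: IndexError/ValueError).
def Pre_solution (m : String) (musicinfos : List String) : Prop :=
  musicinfos.all pvInfoOk = true
instance (m : String) (musicinfos : List String) : Decidable (Pre_solution m musicinfos) := by
  unfold Pre_solution; infer_instance

def pvWitness_solution : String × List String :=
  ("ABCDEFG", ["12:00,12:14,HELLO,C#DEFGAB", "13:00,13:05,WORLD,ABCDEF"])

def Spec_solution (m : String) (musicinfos : List String) (out : String) : Prop := out = solution_alt m musicinfos
instance (m : String) (musicinfos : List String) (out : String) : Decidable (Spec_solution m musicinfos out) := by unfold Spec_solution; infer_instance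

-- ===== CLAIM (what is proved, stated in full; the proofs are below) =====
def Claim_equal_solution : Prop := ∀ (m : String) (musicinfos : List String), Dom_solution m musicinfos → Pre_solution m musicinfos → Spec_solution m musicinfos (solution m musicinfos)

-- ===== LEMMAS AND PROOFS =====

-- replace with a nonempty pattern that does not occur is the identity
theorem pv_replace_go_no_match (old new : List Char) (fuel : Nat) :
    ∀ (l acc : List Char), ¬ old <:+: l →
      PySem.Chars.replace.go old new fuel l acc = acc.reverse ++ l := by
  induction fuel with
  | zero => intro l acc _; simp [PySem.Chars.replace.go]
  | succ n ih =>
    intro l acc h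
    match l with
    | [] => simp [PySem.Chars.replace.go]
    | c :: t =>
      have hpre : old.isPrefixOf (c :: t) = false := by
        by_contra hb
        exact h (List.IsPrefix.isInfix (by simpa using hb : old <+: (c :: t)))
      have ht : ¬ old <:+: t := fun hi => h (hi.trans (List.suffix_cons c t).isInfix)
      simp only [PySem.Chars.replace.go, hpre]
      rw [ih t (c :: acc) ht]
      simp

theorem pv_replace_absent (s pat rep : String) (hne : pat.toList ≠ [])
    (h : PySem.Str.isIn pat s = false) : PySem.Str.replace s pat rep = s := by
  have hinf : ¬ pat.toList <:+: s.toList :=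
    (PySem.Chars.isIn_eq_false_iff pat.toList s.toList).mp (by simpa [PySem.Str.isIn] using h)
  rw [PySem.Str.replace]
  rw [PySem.Chars.replace]
  simp only [List.isEmpty_eq_false_iff.mpr hne, Bool.false_eq_true, if_false]
  rw [pv_replace_go_no_match _ _ _ _ _ hinf]
  simp

-- A's guarded Replace = B's unconditional chain
theorem pv_canon_eq (s : String) : pvReplaceA s = pvCanon s := by
  have step : ∀ (t : String) (pat rep : String), pat.toList ≠ [] →
      (if PySem.Str.isIn pat t then PySem.Str.replace t pat rep else t) =
        PySem.Str.replace t pat rep := by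
    intro t pat rep hne
    by_cases h : PySem.Str.isIn pat t = true
    · rw [if_pos h]
    · have h' : PySem.Str.isIn pat t = false := by simpa using h
      rw [if_neg h, pv_replace_absent t pat rep hne h']
  simp only [pvReplaceA, pvCanon, pvSharps, List.foldl]
  rw [step _ "A#" "a" (by decide), step _ "C#" "c" (by decide), step _ "D#" "d" (by decide),
      step _ "F#" "f" (by decide), step _ "G#" "g" (by decide)]

-- the running best of A's answer list (proof-side spec shared by both final states)
def pvBest (ans : List (Int × Int × String)) : Option Int × String :=
  ans.foldl (fun bt x =>
    match bt.1 with
    | none => (some x.1, x.2.2)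
    | some b => if x.1 > b then (some x.1, x.2.2) else bt) (none, "(None)")

-- the lexicographic sort key A uses, over a genuine linear order
def pvKey (x : Int × Int × String) : Int ×ₗ Int := toLex (-x.1, x.2.1)

theorem pvBest_append (ans : List (Int × Int × String)) (z : Int × Int × String) :
    pvBest (ans ++ [z]) =
      (match (pvBest ans).1 with
       | none => (some z.1, z.2.2)
       | some b => if z.1 > b then (some z.1, z.2.2) else pvBest ans) := by
  simp [pvBest, List.foldl_append]

-- characterisation of pvBest on a nonempty list: a member, maximal play, earliest turn among maxima
theorem pvBest_spec (ans : List (Int × Int × String)) (hne : ans ≠ [])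
    (hp : ans.Pairwise (fun a b => a.2.1 < b.2.1)) :
    ∃ x ∈ ans, pvBest ans = (some x.1, x.2.2) ∧
      (∀ y ∈ ans, y.1 ≤ x.1) ∧ (∀ y ∈ ans, y.1 = x.1 → x.2.1 ≤ y.2.1) := by
  induction ans using List.reverseRecOn with
  | nil => exact absurd rfl hne
  | append_singleton ans z ih =>
    rcases List.eq_nil_or_concat' ans with h0 | h0
    · subst h0
      refine ⟨z, by simp, ?_, by simp, by simp⟩
      simp [pvBest]
    · have hne' : ans ≠ [] := by rcases h0 with ⟨l, a, rfl⟩; simp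
      have hp' : ans.Pairwise (fun a b => a.2.1 < b.2.1) := hp.sublist (by simp)
      obtain ⟨x, hx, hbx, hmax, hturn⟩ := ih hne' hp'
      have hxz : x.2.1 < z.2.1 := by
        have := List.pairwise_append.mp hp
        exact this.2.2 x hx z (by simp)
      rw [pvBest_append, hbx]
      by_cases hgt : z.1 > x.1
      · refine ⟨z, by simp, by simp [hgt], ?_, ?_⟩
        · intro y hy
          rcases List.mem_append.mp hy with hy | hy
          · exact le_trans (hmax y hy) (le_of_lt hgt)
          · simp at hy; subst hy; exact le_refl _
        · intro y hy hyz
          rcases List.mem_append.mp hy with hy | hy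
          · exact absurd hyz (by have := hmax y hy; omega)
          · simp at hy; subst hy; exact le_refl _
      · refine ⟨x, List.mem_append_left _ hx, by simp [hgt], ?_, ?_⟩
        · intro y hy
          rcases List.mem_append.mp hy with hy | hy
          · exact hmax y hy
          · simp at hy; subst hy; omega
        · intro y hy hyx
          rcases List.mem_append.mp hy with hy | hy
          · exact hturn y hy hyx
          · simp at hy; subst hy; exact le_of_lt hxz

-- distinct turns: equal turn components of two members force equality
theorem pv_mem_eq_of_turn (ans : List (Int × Int × String)) :
    ans.Pairwise (fun a b => a.2.1 < b.2.1) →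
    ∀ a ∈ ans, ∀ b ∈ ans, a.2.1 = b.2.1 → a = b := by
  induction ans with
  | nil => intro _ a ha; simp at ha
  | cons hd t ih =>
    intro hp a ha b hb heq
    rw [List.pairwise_cons] at hp
    rcases List.mem_cons.mp ha with ha1 | ha1
    · rcases List.mem_cons.mp hb with hb1 | hb1
      · rw [ha1, hb1]
      · exact absurd heq (by rw [ha1] at heq ⊢; have := hp.1 b hb1; omega)
    · rcases List.mem_cons.mp hb with hb1 | hb1
      · exact absurd heq (by rw [hb1] at heq ⊢; have := hp.1 a ha1; omega)
      · exact ih hp.2 a ha1 b hb1 heq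

-- A's sorted2 call rewritten as a sort by the genuine lexicographic key pvKey
theorem pv_sorted2_eq (ans : List (Int × Int × String)) :
    PySem.List.sorted2 ans (fun x => -x.1) (fun x => x.2.1) false =
      PySem.List.sorted ans pvKey false := by
  simp only [PySem.List.sorted2, PySem.List.sorted]
  congr 1
  funext acc x
  congr 1
  funext a b
  simp only [pvKey, Prod.Lex.toLex_lt_toLex]
  by_cases h1 : -a.1 < -b.1 <;> by_cases h2 : -b.1 < -a.1 <;>
    by_cases h3 : a.2.1 < b.2.1 <;> simp [h1, h2, h3] <;> omega

-- the head of A's sort equals pvBest's pick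
theorem pv_sorted_head (ans : List (Int × Int × String)) (hne : ans ≠ [])
    (hp : ans.Pairwise (fun a b => a.2.1 < b.2.1)) :
    ((PySem.List.sorted2 ans (fun x => -x.1) (fun x => x.2.1) false).headD (0, 0, "")).2.2 =
      (pvBest ans).2 := by
  obtain ⟨x, hx, hbx, hmax, hturn⟩ := pvBest_spec ans hne hp
  rw [pv_sorted2_eq]
  have hperm := PySem.List.sorted_perm ans pvKey false
  have hpw := PySem.List.sorted_pairwise ans pvKey
  have hsne : PySem.List.sorted ans pvKey false ≠ [] := by
    intro h
    have hp2 := hperm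
    rw [h] at hp2
    exact hne (List.Perm.eq_nil hp2.symm)
  obtain ⟨h, t, hsrt⟩ := List.exists_cons_of_ne_nil hsne
  have hhead : ∀ y ∈ ans, pvKey h ≤ pvKey y := by
    intro y hy
    have hy' : y ∈ PySem.List.sorted ans pvKey false := hperm.mem_iff.mpr hy
    rw [hsrt] at hy' hpw
    rcases List.mem_cons.mp hy' with rfl | hy'
    · exact le_refl _
    · exact (List.pairwise_cons.mp hpw).1 y hy'
  have hhmem : h ∈ ans := hperm.mem_iff.mp (by simp [hsrt])
  -- x is also a minimum of pvKey
  have hxmin : ∀ y ∈ ans, pvKey x ≤ pvKey y := by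
    intro y hy
    have h1 : y.1 ≤ x.1 := hmax y hy
    rcases lt_or_eq_of_le h1 with h1 | h1
    · exact le_of_lt ((Prod.Lex.toLex_lt_toLex).mpr (Or.inl (by omega)))
    · have h2 : x.2.1 ≤ y.2.1 := hturn y hy h1
      rcases lt_or_eq_of_le h2 with h2 | h2
      · exact le_of_lt ((Prod.Lex.toLex_lt_toLex).mpr (Or.inr ⟨by omega, h2⟩))
      · have : y = x := pv_mem_eq_of_turn ans hp y hy x hx h2.symm
        subst this; exact le_refl _
  have hkeq : pvKey h = pvKey x := le_antisymm (hhead x hx) (hxmin h hhmem)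
  have hteq : h.2.1 = x.2.1 := by
    have := congrArg (fun p => (ofLex p).2) hkeq
    simpa [pvKey] using this
  have : h = x := pv_mem_eq_of_turn ans hp h hhmem x hx hteq
  rw [hsrt, hbx]
  simp [this]

-- the step functions preserve the simulation relation
def pvRel (stA : Option (List (Int × Int × String) × Int)) (stB : Option (Option Int × String)) : Prop :=
  match stA, stB with
  | none, none => True
  | some (ans, turn), some bt =>
      (∀ x ∈ ans, x.2.1 ≤ turn) ∧ ans.Pairwise (fun a b => a.2.1 < b.2.1) ∧ bt = pvBest ans
  | _, _ => False

theorem pv_step_rel (m : String) (info : String) (stA : Option (List (Int × Int × String) × Int))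
    (stB : Option (Option Int × String)) (h : pvRel stA stB) :
    pvRel (pvStepA m stA info) (pvStepB m stB info) := by
  cases stA with
  | none =>
    cases stB with
    | none => simp [pvStepA, pvStepB, pvRel]
    | some bt => exact absurd h (by simp [pvRel])
  | some p =>
    cases stB with
    | none => exact absurd h (by simp [pvRel])
    | some bt =>
      obtain ⟨ans, turn⟩ := p
      obtain ⟨hub, hp, hbt⟩ := h
      simp only [pvStepA, pvStepB]
      cases hsplit : PySem.Str.split? info "," with
      | none => simp [pvRel]
      | some music =>
        match music with
        | [] => simp [PySem.List.pyGet?, PySem.List.pyIdx?, pvRel]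
        | [a] => simp [PySem.List.pyGet?, PySem.List.pyIdx?, pvRel]
        | [a, b] => simp [PySem.List.pyGet?, PySem.List.pyIdx?, pvRel]
        | [a, b, c] =>
          simp only [PySem.List.pyGet?, PySem.List.pyIdx?]
          norm_num
          (repeat' split) <;> simp [pvRel]
        | a :: b :: c :: d :: rest =>
          simp only [PySem.List.pyGet?, PySem.List.pyIdx?]
          norm_num
          have h0 : (0 : Int) ≤ (rest.length : Int) + 1 + 1 + 1 := by omega
          have h1 : (0 : Int) ≤ (rest.length : Int) + 1 + 1 := by omega
          have h2 : (2 : Int) ≤ (rest.length : Int) + 1 + 1 + 1 := by omega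
          have h3 : (3 : Int) ≤ (rest.length : Int) + 1 + 1 + 1 := by omega
          simp only [h0, h1, h2, h3, if_true]
          norm_num
          cases hsa : PySem.Str.split? a ":" with
          | none =>
            have hma : pvMinutes? a = none := by simp [pvMinutes?, hsa]
            cases pvMinutes? b <;> simp [hma, pvRel]
          | some st =>
            cases hsb : PySem.Str.split? b ":" with
            | none =>
              have hmb : pvMinutes? b = none := by simp [pvMinutes?, hsb]
              simp [hmb, pvRel]
            | some et =>
              match st, et with
              | [], et =>
                have hma : pvMinutes? a = none := by simp [pvMinutes?, hsa]
                cases pvMinutes? b <;>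
                  cases et <;> simp [hma, pvRel]
              | [s0], et =>
                have hma : pvMinutes? a = none := by simp [pvMinutes?, hsa]
                cases pvMinutes? b <;>
                  cases et <;> simp [hma, pvRel]
              | s0 :: s1 :: str, [] =>
                have hmb : pvMinutes? b = none := by simp [pvMinutes?, hsb]
                simp [hmb, pvRel]
              | s0 :: s1 :: str, [e0] =>
                have hmb : pvMinutes? b = none := by simp [pvMinutes?, hsb]
                simp [hmb, pvRel]
              | s0 :: s1 :: str, e0 :: e1 :: etr =>
                simp only [show Int.toNat 2 = 2 from rfl, show Int.toNat 3 = 3 from rfl,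
                  List.getElem?_cons_zero, List.getElem?_cons_succ, List.length_cons]
                norm_num
                cases he0 : PySem.Int.ofStr? e0 with
                | none =>
                  have hmb : pvMinutes? b = none := by simp [pvMinutes?, hsb, he0]
                  simp [hmb, pvRel]
                | some ie0 =>
                cases he1 : PySem.Int.ofStr? e1 with
                | none =>
                  have hmb : pvMinutes? b = none := by simp [pvMinutes?, hsb, he0, he1]
                  simp [hmb, pvRel]
                | some ie1 =>
                cases hs0 : PySem.Int.ofStr? s0 with
                | none =>
                  have hma : pvMinutes? a = none := by simp [pvMinutes?, hsa, hs0]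
                  have hmb : pvMinutes? b = some (ie0 * 60 + ie1) := by
                    simp [pvMinutes?, hsb, he0, he1]
                  simp [hma, hmb, pvRel]
                | some is0 =>
                cases hs1 : PySem.Int.ofStr? s1 with
                | none =>
                  have hma : pvMinutes? a = none := by simp [pvMinutes?, hsa, hs0, hs1]
                  have hmb : pvMinutes? b = some (ie0 * 60 + ie1) := by
                    simp [pvMinutes?, hsb, he0, he1]
                  simp [hma, hmb, pvRel]
                | some is1 =>
                have hma : pvMinutes? a = some (is0 * 60 + is1) := by
                  simp [pvMinutes?, hsa, hs0, hs1]
                have hmb : pvMinutes? b = some (ie0 * 60 + ie1) := by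
                  simp [pvMinutes?, hsb, he0, he1]
                simp only [hma, hmb, pv_canon_eq]
                subst hbt
                cases hP : PySem.Chars.isIn m.toList
                    (PySem.List.slice
                      (PySem.List.pyRepeat (pvCanon d).toList (ie0 * 60 + ie1 - (is0 * 60 + is1)))
                      none (some (ie0 * 60 + ie1 - (is0 * 60 + is1)))) with
                | false =>
                  simp only [Bool.false_eq_true, and_false, if_false]
                  exact ⟨fun x hx => by have := hub x hx; omega, hp, rfl⟩
                | true =>
                  have hpw' : (ans ++ [(ie0 * 60 + ie1 - (is0 * 60 + is1), turn + 1, c)]).Pairwise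
                      (fun x y => x.2.1 < y.2.1) := by
                    rw [List.pairwise_append]
                    exact ⟨hp, List.pairwise_singleton _ _,
                      fun x hx z hz => by simp at hz; subst hz; have := hub x hx; simp; omega⟩
                  have hub' : ∀ x ∈ ans ++ [(ie0 * 60 + ie1 - (is0 * 60 + is1), turn + 1, c)],
                      x.2.1 ≤ turn + 1 := by
                    intro x hx
                    rcases List.mem_append.mp hx with hx | hx
                    · have := hub x hx; omega
                    · simp at hx; subst hx; simp
                  cases hq : (pvBest ans).1 with
                  | none =>
                    simp only [and_true, if_true]
                    exact ⟨hub', hpw', by rw [pvBest_append, hq]⟩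
                  | some bmax =>
                    by_cases hlt : bmax < ie0 * 60 + ie1 - (is0 * 60 + is1)
                    · have hd : decide (bmax < ie0 * 60 + ie1 - (is0 * 60 + is1)) = true := by
                        simp [hlt]
                      simp only [hd, and_true, if_true]
                      exact ⟨hub', hpw', by rw [pvBest_append, hq]; simp [hlt]⟩
                    · have hd : decide (bmax < ie0 * 60 + ie1 - (is0 * 60 + is1)) = false := by
                        simp [hlt]
                      simp only [hd, Bool.false_eq_true, false_and, if_false]
                      exact ⟨hub', hpw', by rw [pvBest_append, hq]; simp [hlt]⟩

theorem pv_fold_rel (m : String) (musicinfos : List String)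
    (stA : Option (List (Int × Int × String) × Int)) (stB : Option (Option Int × String))
    (h : pvRel stA stB) :
    pvRel (musicinfos.foldl (pvStepA m) stA) (musicinfos.foldl (pvStepB m) stB) := by
  induction musicinfos generalizing stA stB with
  | nil => exact h
  | cons i t ih => exact ih _ _ (pv_step_rel m i stA stB h)

-- ===== VERDICT (by name: the statement is the Claim_ definition above) =====
theorem solution_spec : Claim_equal_solution := by
  intro m musicinfos _ hpre
  unfold Spec_solution solution solution_alt
  rw [pv_canon_eq]
  have hrel := pv_fold_rel (pvCanon m) musicinfos (some ([], 0)) (some (none, "(None)"))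
    (by constructor <;> simp [pvBest])
  cases hA : musicinfos.foldl (pvStepA (pvCanon m)) (some ([], 0)) with
  | none =>
    cases hB : musicinfos.foldl (pvStepB (pvCanon m)) (some (none, "(None)")) with
    | none => rfl
    | some bt => rw [hA, hB] at hrel; exact absurd hrel (by simp [pvRel])
  | some p =>
    obtain ⟨ans, turn⟩ := p
    cases hB : musicinfos.foldl (pvStepB (pvCanon m)) (some (none, "(None)")) with
    | none => rw [hA, hB] at hrel; exact absurd hrel (by simp [pvRel])
    | some bt =>
      rw [hA, hB] at hrel
      obtain ⟨_, hp, hbt⟩ := hrel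
      by_cases h0 : ans = []
      · subst h0; simp [hbt, pvBest]
      · by_cases h1 : ans.length = 1
        · obtain ⟨x, hx⟩ := List.length_eq_one_iff.mp h1
          subst hx
          simp [hbt, pvBest]
        · simp only [h0, if_false, h1, if_false]
          rw [pv_sorted_head ans h0 hp, hbt]
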